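-- pv_equiv track=rewrite | github.com/NovaSky-AI/SkyRL | skyrl-gym/skyrl_gym/envs/rlm/evidence_tools.py | _intersection_size
-- ===== SOURCE A (Python) =====
-- from typing import Any, Dict, List, Tuple
--
-- def _merge_intervals(intervals: List[Tuple[int, int]]) -> List[Tuple[int, int]]:
--     result = []
--     for start, end in sorted(intervals):
--         if result and start <= result[-1][1]:
--             result[-1] = (result[-1][0], max(result[-1][1], end))
--         else:
--             result.append((start, end))
--     return result
--
-- def _intersection_size(a: List[Tuple[int, int]], b: List[Tuple[int, int]]) -> int:
--     a, b = _merge_intervals(a), _merge_intervals(b)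
--     i = j = total = 0
--     while i < len(a) and j < len(b):
--         lo, hi = max(a[i][0], b[j][0]), min(a[i][1], b[j][1])
--         if lo < hi:
--             total += hi - lo
--         if a[i][1] < b[j][1]:
--             i += 1
--         else:
--             j += 1
--     return total
-- ===== SOURCE B (Python) =====
-- from typing import List, Tuple
--
-- def _merge_intervals(intervals: List[Tuple[int, int]]) -> List[Tuple[int, int]]:
--     result = []
--     for start, end in sorted(intervals):
--         if result and start <= result[-1][1]:
--             result[-1] = (result[-1][0], max(result[-1][1], end))
--         else:
--             result.append((start, end))
--     return result
--
-- def _intersection_size(a: List[Tuple[int, int]], b: List[Tuple[int, int]]) -> int: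
--     ma, mb = _merge_intervals(a), _merge_intervals(b)
--     return sum(max(0, min(x2, y2) - max(x1, y1)) for x1, x2 in ma for y1, y2 in mb)
-- ===== Notes on version B (the rewrite author's own statement) =====
-- stated objective: simpler
-- what changed: Replaces the index-based two-pointer sweep over the two merged interval lists with a single sum of the clamped pairwise overlap max(0, min(ends) - max(starts)) over all pairs of merged intervals; correctness rests on the fact that after merging, intervals are pairwise separated so each pair overlapping positively is exactly one the sweep credits.
import Mathlib
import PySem

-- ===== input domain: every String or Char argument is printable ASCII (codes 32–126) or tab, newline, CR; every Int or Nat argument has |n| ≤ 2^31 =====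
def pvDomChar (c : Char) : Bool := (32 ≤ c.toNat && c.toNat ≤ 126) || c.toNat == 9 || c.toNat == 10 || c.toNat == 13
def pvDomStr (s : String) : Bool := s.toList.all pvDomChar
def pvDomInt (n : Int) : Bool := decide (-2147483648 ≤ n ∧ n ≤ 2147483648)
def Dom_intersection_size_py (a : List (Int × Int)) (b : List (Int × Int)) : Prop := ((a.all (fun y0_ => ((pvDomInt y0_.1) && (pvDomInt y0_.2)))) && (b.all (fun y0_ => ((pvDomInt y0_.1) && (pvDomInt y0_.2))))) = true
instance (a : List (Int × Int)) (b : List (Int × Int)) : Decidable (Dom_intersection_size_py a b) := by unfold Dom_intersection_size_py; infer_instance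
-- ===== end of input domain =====

-- B replaces A's two-pointer sweep over the merged lists with a plain sum of clamped
-- pairwise overlaps over all pairs of merged intervals (simpler decomposition, same merge).


-- ===== PORT A =====
-- shared helper _merge_intervals (both Pythons call this same module helper).
-- `result` is kept in reverse: Python's append is cons, result[-1] is the head.
def pvMergeStep (acc : List (Int × Int)) (p : Int × Int) : List (Int × Int) :=
  match acc with
  | [] => [p]
  | q :: rest => if p.1 ≤ q.2 then (q.1, max q.2 p.2) :: rest else p :: q :: rest

def merge_intervals_py (intervals : List (Int × Int)) : List (Int × Int) :=
  ((PySem.List.sorted2 intervals Prod.fst Prod.snd).foldl pvMergeStep []).reverse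

-- the while-loop of A: advancing i/j = structural recursion on the two lists
def pvSweep : List (Int × Int) → List (Int × Int) → Int
  | [], _ => 0
  | _ :: _, [] => 0
  | x :: xs, y :: ys =>
      (if max x.1 y.1 < min x.2 y.2 then min x.2 y.2 - max x.1 y.1 else 0) +
      (if x.2 < y.2 then pvSweep xs (y :: ys) else pvSweep (x :: xs) ys)
  termination_by a b => a.length + b.length

def intersection_size_py (a : List (Int × Int)) (b : List (Int × Int)) : Int :=
  pvSweep (merge_intervals_py a) (merge_intervals_py b)

-- ===== PORT B =====
-- clamped overlap of one pair of intervals: max(0, min(x2, y2) - max(x1, y1))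
def pvOv (x y : Int × Int) : Int := max 0 (min x.2 y.2 - max x.1 y.1)

def intersection_size_py_alt (a : List (Int × Int)) (b : List (Int × Int)) : Int :=
  ((merge_intervals_py a).map
    (fun x => ((merge_intervals_py b).map (fun y => pvOv x y)).sum)).sum

-- ===== PRECONDITION & SPEC =====
def Spec_intersection_size_py (a : List (Int × Int)) (b : List (Int × Int)) (out : Int) : Prop := out = intersection_size_py_alt a b
instance (a : List (Int × Int)) (b : List (Int × Int)) (out : Int) : Decidable (Spec_intersection_size_py a b out) := by unfold Spec_intersection_size_py; infer_instance

-- ===== CLAIM (what is proved, stated in full; the proofs are below) =====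
def Claim_equal_intersection_size_py : Prop := ∀ (a : List (Int × Int)) (b : List (Int × Int)), Dom_intersection_size_py a b → Spec_intersection_size_py a b (intersection_size_py a b)

-- ===== LEMMAS AND PROOFS =====

-- the boolean comparator of sorted2 (key = (fst, snd)) is the lexicographic order on pairs
lemma pvBefore_eq :
    (fun (a b : Int × Int) => (decide (a.1 < b.1) || (!decide (b.1 < a.1) && decide (a.2 < b.2))))
      = fun (a b : Int × Int) => decide (toLex a < toLex b) := by
  funext a b
  rcases lt_trichotomy a.1 b.1 with h | h | h
  · simp [Prod.Lex.lt_iff, h, lt_asymm h]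
  · simp [Prod.Lex.lt_iff, h]
  · simp [Prod.Lex.lt_iff, h, lt_asymm h]
    omega

-- sorted2 with keys fst, snd is PySem.List.sorted under the lexicographic key
lemma sorted2_eq_sorted_lex (xs : List (Int × Int)) :
    PySem.List.sorted2 xs Prod.fst Prod.snd
      = PySem.List.sorted xs (fun p => toLex p) := by
  show List.foldl (fun acc x => PySem.List.insertBy
        (fun a b => (decide (a.1 < b.1) || (!decide (b.1 < a.1) && decide (a.2 < b.2)))) x acc) [] xs
      = List.foldl (fun acc x => PySem.List.insertBy
        (fun a b => decide (toLex a < toLex b)) x acc) [] xs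
  rw [pvBefore_eq]

-- hence the starts of the sorted input are nondecreasing
lemma sorted2_pairwise_fst (xs : List (Int × Int)) :
    (PySem.List.sorted2 xs Prod.fst Prod.snd).Pairwise (fun p q => p.1 ≤ q.1) := by
  rw [sorted2_eq_sorted_lex]
  refine (PySem.List.sorted_pairwise xs (fun p => toLex p)).imp ?_
  intro p q h
  rcases (Prod.Lex.le_iff).1 h with h1 | ⟨h1, _⟩
  · exact le_of_lt h1
  · exact le_of_eq h1

-- invariant of the merge fold: the accumulator (= `result` reversed) is pairwise
-- separated (each later-pushed interval starts strictly after every earlier end, and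
-- starts never decrease), and every start in the accumulator is ≤ every remaining start
lemma merge_fold_invariant (l : List (Int × Int)) : ∀ (acc : List (Int × Int)),
    l.Pairwise (fun p q => p.1 ≤ q.1) →
    acc.Pairwise (fun p q => q.2 < p.1 ∧ q.1 ≤ p.1) →
    (∀ q ∈ acc, ∀ p ∈ l, q.1 ≤ p.1) →
    (l.foldl pvMergeStep acc).Pairwise (fun p q => q.2 < p.1 ∧ q.1 ≤ p.1) := by
  induction l with
  | nil => intro acc _ hacc _; simpa using hacc
  | cons p l ih =>
    intro acc hl hacc hconn
    have hl' := (List.pairwise_cons.1 hl).2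
    have hpl : ∀ r ∈ l, p.1 ≤ r.1 := (List.pairwise_cons.1 hl).1
    rw [List.foldl_cons]
    apply ih _ hl'
    · -- accumulator invariant after one step
      cases acc with
      | nil => simp [pvMergeStep]
      | cons q rest =>
        have hq := List.pairwise_cons.1 hacc
        by_cases hmerge : p.1 ≤ q.2
        · simp only [pvMergeStep, if_pos hmerge]
          exact List.pairwise_cons.2 ⟨fun r hr => hq.1 r hr, hq.2⟩
        · simp only [pvMergeStep, if_neg hmerge]
          have hqp : q.1 ≤ p.1 := hconn q (by simp) p (by simp)
          refine List.pairwise_cons.2 ⟨?_, hacc⟩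
          intro r hr
          rcases List.mem_cons.1 hr with hr | hr
          · subst hr; exact ⟨by omega, hqp⟩
          · have := hq.1 r hr; exact ⟨by omega, by omega⟩
    · -- connection invariant after one step
      intro q' hq' p' hp'
      have hpp' : p.1 ≤ p'.1 := hpl p' hp'
      cases acc with
      | nil =>
        simp only [pvMergeStep, List.mem_singleton] at hq'
        subst hq'; omega
      | cons q rest =>
        by_cases hmerge : p.1 ≤ q.2
        · simp only [pvMergeStep, if_pos hmerge] at hq'
          rcases List.mem_cons.1 hq' with hq' | hq'
          · have : q.1 ≤ p.1 := hconn q (by simp) p (by simp)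
            subst hq'; simp; omega
          · exact le_trans (hconn q' (by simp [hq']) p (by simp)) (by omega)
        · simp only [pvMergeStep, if_neg hmerge] at hq'
          rcases List.mem_cons.1 hq' with hq' | hq'
          · subst hq'; omega
          · exact le_trans (hconn q' (by simp [hq']) p (by simp)) (by omega)

-- the merged list is pairwise separated
lemma merged_sep (xs : List (Int × Int)) :
    (merge_intervals_py xs).Pairwise (fun p q => p.2 < q.1) := by
  unfold merge_intervals_py
  rw [List.pairwise_reverse]
  exact (merge_fold_invariant (PySem.List.sorted2 xs Prod.fst Prod.snd) []
    (sorted2_pairwise_fst xs) (by simp) (by simp)).imp (fun h => h.1)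

-- A's conditional increment is exactly the clamped overlap
lemma if_eq_pvOv (x y : Int × Int) :
    (if max x.1 y.1 < min x.2 y.2 then min x.2 y.2 - max x.1 y.1 else 0) = pvOv x y := by
  unfold pvOv; split_ifs <;> omega

lemma pvOv_eq_zero_of_le {x y : Int × Int} (h : min x.2 y.2 ≤ max x.1 y.1) : pvOv x y = 0 := by
  unfold pvOv; omega

lemma map_sum_zero {L : List (Int × Int)} {f : (Int × Int) → Int}
    (h : ∀ z ∈ L, f z = 0) : (L.map f).sum = 0 := by
  refine List.sum_eq_zero ?_
  intro z hz
  obtain ⟨w, hw, hwz⟩ := List.mem_map.1 hz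
  rw [← hwz]; exact h w hw

-- the sweep equals the full pairwise sum, for pairwise-separated lists
lemma sweep_eq_pairsum (A B : List (Int × Int)) :
    A.Pairwise (fun p q => p.2 < q.1) → B.Pairwise (fun p q => p.2 < q.1) →
    pvSweep A B = (A.map (fun x => (B.map (fun y => pvOv x y)).sum)).sum := by
  induction A, B using pvSweep.induct with
  | case1 B =>
    intro _ _; simp [pvSweep]
  | case2 x xs =>
    intro _ _
    rw [pvSweep]
    exact (map_sum_zero (by intro z _; simp)).symm
  | case3 x xs y ys ih1 ih2 =>
    intro hA hB
    by_cases hlt : x.2 < y.2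
    · -- A advances (x.2 < y.2): x overlaps no y' beyond y
      have hys : (ys.map (fun y' => pvOv x y')).sum = 0 := by
        refine map_sum_zero ?_
        intro y' hy'
        have hsep : y.2 < y'.1 := (List.pairwise_cons.1 hB).1 y' hy'
        exact pvOv_eq_zero_of_le (by omega)
      rw [pvSweep, if_pos hlt, if_eq_pvOv, ih1 (List.pairwise_cons.1 hA).2 hB]
      simp only [List.map_cons, List.sum_cons, hys]
      omega
    · -- B advances (y.2 ≤ x.2): y overlaps no x' beyond x
      have hxs : (xs.map (fun x' => pvOv x' y)).sum = 0 := by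
        refine map_sum_zero ?_
        intro x' hx'
        have hsep : x.2 < x'.1 := (List.pairwise_cons.1 hA).1 x' hx'
        exact pvOv_eq_zero_of_le (by omega)
      rw [pvSweep, if_neg hlt, if_eq_pvOv, ih2 hA (List.pairwise_cons.1 hB).2]
      -- split the inner sums over y :: ys into the y-column plus the rest
      have hsplit :
          ((x :: xs).map (fun x' => ((y :: ys).map (fun y' => pvOv x' y')).sum)).sum
            = ((x :: xs).map (fun x' => pvOv x' y)).sum
              + ((x :: xs).map (fun x' => (ys.map (fun y' => pvOv x' y')).sum)).sum := by
        simp only [List.map_cons, List.sum_cons, List.sum_map_add]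
        ring
      rw [hsplit]
      simp only [List.map_cons, List.sum_cons, hxs]
      omega

-- ===== VERDICT (by name: the statement is the Claim_ definition above) =====
theorem intersection_size_py_spec : Claim_equal_intersection_size_py := by
  intro a b _
  unfold Spec_intersection_size_py intersection_size_py intersection_size_py_alt
  exact sweep_eq_pairsum _ _ (merged_sep a) (merged_sep b)
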